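-- pv_equiv track=rewrite | github.com/Ahib-Afnan-Siam/LeetCode-Practice | 3491-find-the-maximum-length-of-valid-subsequence-ii/3491-find-the-maximum-length-of-valid-subsequence-ii.py | maximumLength
-- ===== SOURCE A (Python) =====
-- from typing import List
--
-- def maximumLength(nums: List[int], k: int) -> int:
--     dp0 = [[0] * k for _ in range(k)]
--     dp1 = [[0] * k for _ in range(k)]
--     ans = 1
--
--     for num in nums:
--         a = num % k
--         updates0 = []
--         updates1 = []
--
--         for y in range(k):
--             candidate0 = max(dp0[a][y], 1, dp1[a][y] + 1)
--             candidate1 = max(dp1[y][a], 1, dp0[y][a] + 1)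
--             updates0.append((y, candidate0))
--             updates1.append((y, candidate1))
--
--         for y, val in updates0:
--             dp0[a][y] = val
--             if val > ans:
--                 ans = val
--
--         for y, val in updates1:
--             dp1[y][a] = val
--             if val > ans:
--                 ans = val
--
--     return ans
-- ===== SOURCE B (Python) =====
-- from typing import List
--
-- def maximumLength(nums: List[int], k: int) -> int:
--     # Table-free brute force over alternating residue patterns: bucket the
--     # positions of each residue (scanning from the right), then count each
--     # pattern (x, y) with a two-pointer greedy walk over the two buckets.
--     buckets = {}
--     for i, num in enumerate(reversed(nums)):
--         buckets.setdefault(num % k, []).append(i)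
--     ans = 1
--     for x in buckets:
--         for y in buckets:
--             if x == y:
--                 cnt = len(buckets[x])
--             else:
--                 bx, by = buckets[x], buckets[y]
--                 cnt = 0
--                 cur = -1
--                 i = 0
--                 j = 0
--                 want_x = True
--                 while True:
--                     if want_x:
--                         if i >= len(bx):
--                             break
--                         p = bx[i]
--                         i += 1
--                         if p > cur:
--                             cur = p
--                             cnt += 1
--                             want_x = False
--                     else:
--                         if j >= len(by):
--                             break
--                         p = by[j]
--                         j += 1
--                         if p > cur:
--                             cur = p
--                             cnt += 1
--                             want_x = True
--             if cnt > ans: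
--                 ans = cnt
--     return ans
-- ===== Notes on version B (the rewrite author's own statement) =====
-- stated objective: alternative
-- what changed: Replaced the single-pass DP over two mirrored k x k residue-pair tables with deferred updates by a table-free brute force: bucket each residue's positions once, then count every alternating residue pattern (x,y) with its own two-pointer greedy walk over the two buckets.
-- intended difference: For k < 0 (outside the problem's guarantee 1 <= k) with at least two elements, A returns the constant 1 because its pattern loop range(k) is empty, while B returns the actual maximal valid-subsequence length (always >= 2 there), which is the intended value. — e.g. on maximumLength([0, 1], -1): A returns 1, B returns 2
import Mathlib
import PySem

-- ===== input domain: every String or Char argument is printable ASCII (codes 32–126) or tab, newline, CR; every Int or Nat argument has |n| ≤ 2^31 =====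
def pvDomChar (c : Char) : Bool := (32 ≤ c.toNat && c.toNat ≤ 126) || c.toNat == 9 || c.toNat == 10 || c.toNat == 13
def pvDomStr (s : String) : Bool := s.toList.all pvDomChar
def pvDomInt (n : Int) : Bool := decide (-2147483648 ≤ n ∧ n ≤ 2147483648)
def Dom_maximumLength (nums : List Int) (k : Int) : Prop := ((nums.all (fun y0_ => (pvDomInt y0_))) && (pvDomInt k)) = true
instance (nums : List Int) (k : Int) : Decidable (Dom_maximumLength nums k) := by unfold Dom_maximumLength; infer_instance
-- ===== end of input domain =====

-- B drops A's residue-pair DP tables entirely: it buckets each residue's positions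
-- once and counts every alternating residue pattern with its own two-pointer greedy
-- walk over two buckets (objective: alternative algorithm, no speed claim).

-- ===== PORT A =====
-- m[i][j] read; on admitted inputs every index Python uses is in range, so the default-variant is exact
def pvGet2 (m : List (List Int)) (i j : Int) : Int :=
  PySem.List.pyGetD (PySem.List.pyGetD m i []) j 0

-- m[i][j] = v
def pvSet2 (m : List (List Int)) (i j : Int) (v : Int) : List (List Int) :=
  PySem.List.pySetD m i (PySem.List.pySetD (PySem.List.pyGetD m i []) j v)

def maximumLength (nums : List Int) (k : Int) : Int :=
  -- [[0] * k for _ in range(k)]  ([0]*k is empty for k ≤ 0, exactly as List.replicate k.toNat)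
  let init : List (List Int) := (PySem.List.pyRange 0 k 1).map (fun _ => List.replicate k.toNat 0)
  let s := nums.foldl (fun (st : List (List Int) × List (List Int) × Int) num =>
    let dp0 := st.1; let dp1 := st.2.1; let ans := st.2.2
    let a := PySem.Int.mod num k
    let us := (PySem.List.pyRange 0 k 1).foldl (fun (u : List (Int × Int) × List (Int × Int)) y =>
        let c0 := max (max (pvGet2 dp0 a y) 1) (pvGet2 dp1 a y + 1)
        let c1 := max (max (pvGet2 dp1 y a) 1) (pvGet2 dp0 y a + 1)
        (u.1 ++ [(y, c0)], u.2 ++ [(y, c1)])) ([], [])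
    let st0 := us.1.foldl (fun (p : List (List Int) × Int) yv =>
        (pvSet2 p.1 a yv.1 yv.2, if yv.2 > p.2 then yv.2 else p.2)) (dp0, ans)
    let st1 := us.2.foldl (fun (p : List (List Int) × Int) yv =>
        (pvSet2 p.1 yv.1 a yv.2, if yv.2 > p.2 then yv.2 else p.2)) (dp1, st0.2)
    (st0.1, st1.1, st1.2)) (init, init, 1)
  s.2.2

-- ===== PORT B =====
-- the while loop of Source B: pointers i, j into the two buckets, one element per iteration
def pyAltGo (bx by_ : List Int) (i j : Nat) (cur cnt : Int) (wantx : Bool) : Int :=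
  if wantx then
    if h : i < bx.length then
      let p := PySem.List.pyGetD bx (i : Int) 0   -- bx[i], always in range here
      if p > cur then pyAltGo bx by_ (i + 1) j p (cnt + 1) false
      else pyAltGo bx by_ (i + 1) j cur cnt true
    else cnt
  else
    if h : j < by_.length then
      let p := PySem.List.pyGetD by_ (j : Int) 0   -- by[j], always in range here
      if p > cur then pyAltGo bx by_ i (j + 1) p (cnt + 1) true
      else pyAltGo bx by_ i (j + 1) cur cnt false
    else cnt
termination_by (bx.length - i) + (by_.length - j)
decreasing_by all_goals omega

def maximumLength_alt (nums : List Int) (k : Int) : Int :=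
  -- buckets[r] = positions of residue r in reversed(nums), in scan order
  let buckets := (PySem.List.enumerate nums.reverse 0).foldl
      (fun (d : PySem.Dict Int (List Int)) q =>
        d.modify (PySem.Int.mod q.2 k) [] (· ++ [q.1])) PySem.Dict.empty
  (PySem.Dict.keys buckets).foldl (fun ans x =>
    (PySem.Dict.keys buckets).foldl (fun ans y =>
      let cnt := if x == y then ((PySem.Dict.getD buckets x []).length : Int)
                 else pyAltGo (PySem.Dict.getD buckets x []) (PySem.Dict.getD buckets y []) 0 0 (-1) 0 true
      if cnt > ans then cnt else ans) ans) 1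

-- ===== PRECONDITION & SPEC =====
-- Pre_ excludes only k = 0 with nonempty nums, where Python A raises ZeroDivisionError (num % 0); B raises there too.
def Pre_maximumLength (nums : List Int) (k : Int) : Prop := nums = [] ∨ k ≠ 0
instance (nums : List Int) (k : Int) : Decidable (Pre_maximumLength nums k) := by
  unfold Pre_maximumLength; infer_instance
def pvWitness_maximumLength : List Int × Int := ([1, 2, 3, 4], 3)

-- For k < 0 (outside the problem's guarantee 1 <= k) with at least two elements, A returns the
-- constant 1 because its pattern loop range(k) is empty, while B returns the actual maximal
-- valid-subsequence length (always >= 2 there); B's value is the intended one.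
def D_maximumLength (nums : List Int) (k : Int) : Prop := k < 0 ∧ 2 ≤ nums.length
instance (nums : List Int) (k : Int) : Decidable (D_maximumLength nums k) := by
  unfold D_maximumLength; infer_instance

def Spec_maximumLength (nums : List Int) (k : Int) (out : Int) : Prop := ¬ D_maximumLength nums k → out = maximumLength_alt nums k
instance (nums : List Int) (k : Int) (out : Int) : Decidable (Spec_maximumLength nums k out) := by
  unfold Spec_maximumLength; infer_instance

def pvDiffWitness_maximumLength : List Int × Int := ([0, 1], -1)
def pvDiffWitnessOut_maximumLength : Int × Int := (1, 2)

-- ===== CLAIM (what is proved, stated in full; the proofs are below) =====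
def Claim_unchanged_maximumLength : Prop := ∀ (nums : List Int) (k : Int), Dom_maximumLength nums k → Pre_maximumLength nums k → Spec_maximumLength nums k (maximumLength nums k)
def Claim_changed_maximumLength : Prop := Dom_maximumLength (pvDiffWitness_maximumLength.1) (pvDiffWitness_maximumLength.2) ∧ Pre_maximumLength (pvDiffWitness_maximumLength.1) (pvDiffWitness_maximumLength.2) ∧ D_maximumLength (pvDiffWitness_maximumLength.1) (pvDiffWitness_maximumLength.2) ∧ maximumLength (pvDiffWitness_maximumLength.1) (pvDiffWitness_maximumLength.2) = pvDiffWitnessOut_maximumLength.1 ∧ maximumLength_alt (pvDiffWitness_maximumLength.1) (pvDiffWitness_maximumLength.2) = pvDiffWitnessOut_maximumLength.2 ∧ pvDiffWitnessOut_maximumLength.1 ≠ pvDiffWitnessOut_maximumLength.2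
def Claim_exact_maximumLength : Prop := ∀ (nums : List Int) (k : Int), Dom_maximumLength nums k → Pre_maximumLength nums k → D_maximumLength nums k → maximumLength nums k ≠ maximumLength_alt nums k

-- ===== LEMMAS AND PROOFS =====

-- ==== stage 1: k×k tables as functions ====

def pvTbl (K : Nat) (f : Nat → Nat → Int) : List (List Int) :=
  (List.range K).map fun x => (List.range K).map fun y => f x y

theorem pvRange0 (K : Nat) : PySem.List.pyRange 0 (K : Int) 1 = (List.range K).map (fun (t : Nat) => (t : Int)) :=
  PySem.List.pyRange_zero_natCast K

theorem get2_tbl (K : Nat) (f : Nat → Nat → Int) (i j : Nat) (hi : i < K) (hj : j < K) :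
    pvGet2 (pvTbl K f) (i : Int) (j : Int) = f i j := by
  simp [pvGet2, pvTbl, PySem.List.pyGetD_natCast, List.getD_eq_getElem?_getD, hi, hj]

theorem tbl_congr (K : Nat) (f g : Nat → Nat → Int)
    (h : ∀ x < K, ∀ y < K, f x y = g x y) : pvTbl K f = pvTbl K g := by
  unfold pvTbl
  refine List.map_congr_left (fun x hx => ?_)
  refine List.map_congr_left (fun y hy => ?_)
  exact h x (List.mem_range.mp hx) y (List.mem_range.mp hy)

theorem set2_tbl (K : Nat) (g : Nat → Nat → Int) (i j : Nat) (hi : i < K) (hj : j < K) (v : Int) :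
    pvSet2 (pvTbl K g) (i : Int) (j : Int) v
      = pvTbl K (fun x y => if x = i ∧ y = j then v else g x y) := by
  unfold pvSet2 pvTbl
  simp only [PySem.List.pySetD_natCast, PySem.List.pyGetD_natCast]
  apply List.ext_getElem
  · simp
  · intro n h1 h2
    simp only [List.getElem_set, List.getElem_map, List.getElem_range] at *
    by_cases hn : n = i
    · subst hn
      rw [List.getD_eq_getElem?_getD]
      simp only [List.getElem?_map, List.getElem?_range, hi, Option.map_some,
        Option.getD_some, true_and]
      apply List.ext_getElem
      · simp
      · intro m hm1 hm2
        simp only [List.getElem_map, List.getElem_range, List.length_set, List.length_map,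
          List.length_range] at *
        try simp only [if_true] at hm1 ⊢
        by_cases hm : m = j
        · subst hm
          rw [List.getElem_set_self (by (try simp only [List.length_map, List.length_range]); omega)]
          simp
        · rw [List.getElem_set_ne (by omega)]; simp [hm]
    · simp [hn, Ne.symm hn]

-- ==== stage 2: the functional DP step and the running-max fold ====

def pvStep (a : Nat) (f : Nat → Nat → Int) : Nat → Nat → Int :=
  fun p c => if c = a then f a p + 1 else f p c

def pvGood (f : Nat → Nat → Int) : Prop := ∀ x y, 0 ≤ f x y ∧ f y x ≤ f x y + 1

theorem good_step (a : Nat) (f : Nat → Nat → Int) (h : pvGood f) : pvGood (pvStep a f) := by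
  intro x y
  have h1 := h x y
  have h2 := h a x
  have h3 := h a y
  have h4 := h a a
  simp only [pvStep]
  by_cases hy : y = a <;> by_cases hx : x = a <;> subst_vars <;> simp_all <;> omega

def fmax {α : Type} (C : α → Int) (l : List α) (s : Int) : Int :=
  l.foldl (fun s e => if C e > s then C e else s) s

theorem fmax_le {α : Type} (C : α → Int) : ∀ (l : List α) (s : Int), s ≤ fmax C l s := by
  intro l
  induction l with
  | nil => intro s; simp [fmax]
  | cons x l ih =>
    intro s
    simp only [fmax, List.foldl_cons]
    refine le_trans ?_ (ih _)
    split <;> omega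

theorem fmax_mem {α : Type} (C : α → Int) : ∀ (l : List α) (s : Int) (e : α), e ∈ l →
    C e ≤ fmax C l s := by
  intro l
  induction l with
  | nil => simp
  | cons x l ih =>
    intro s e he
    simp only [fmax, List.foldl_cons]
    rcases List.mem_cons.mp he with h | h
    · subst h
      refine le_trans ?_ (fmax_le C l _)
      split <;> omega
    · exact ih _ e h

theorem fmax_const {α : Type} (C : α → Int) : ∀ (l : List α) (s : Int), (∀ e ∈ l, C e ≤ s) →
    fmax C l s = s := by
  intro l
  induction l with
  | nil => intro s _; simp [fmax]
  | cons x l ih =>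
    intro s h
    simp only [fmax, List.foldl_cons]
    have hx : C x ≤ s := h x (by simp)
    have : (if C x > s then C x else s) = s := by split <;> omega
    rw [this]
    exact ih s (fun e he => h e (by simp [he]))

theorem fmax_twice {α : Type} (C : α → Int) (l : List α) (s : Int) :
    fmax C l (fmax C l s) = fmax C l s :=
  fmax_const C l _ (fun e he => fmax_mem C l s e he)

theorem fmax_ub {α : Type} (C : α → Int) : ∀ (l : List α) (s t : Int), s ≤ t →
    (∀ e ∈ l, C e ≤ t) → fmax C l s ≤ t := by
  intro l
  induction l with
  | nil => intro s t hs _; simpa [fmax] using hs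
  | cons x l ih =>
    intro s t hs h
    simp only [fmax, List.foldl_cons]
    have hx : C x ≤ t := h x (by simp)
    refine ih _ t (by split <;> omega) (fun e he => h e (by simp [he]))

-- ==== stage 3: A collapses to the functional DP with a running max ====

def pvAbody (k : Int) (st : List (List Int) × List (List Int) × Int) (num : Int) :
    List (List Int) × List (List Int) × Int :=
  let dp0 := st.1; let dp1 := st.2.1; let ans := st.2.2
  let a := PySem.Int.mod num k
  let us := (PySem.List.pyRange 0 k 1).foldl (fun (u : List (Int × Int) × List (Int × Int)) y =>
      let c0 := max (max (pvGet2 dp0 a y) 1) (pvGet2 dp1 a y + 1)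
      let c1 := max (max (pvGet2 dp1 y a) 1) (pvGet2 dp0 y a + 1)
      (u.1 ++ [(y, c0)], u.2 ++ [(y, c1)])) ([], [])
  let st0 := us.1.foldl (fun (p : List (List Int) × Int) yv =>
      (pvSet2 p.1 a yv.1 yv.2, if yv.2 > p.2 then yv.2 else p.2)) (dp0, ans)
  let st1 := us.2.foldl (fun (p : List (List Int) × Int) yv =>
      (pvSet2 p.1 yv.1 a yv.2, if yv.2 > p.2 then yv.2 else p.2)) (dp1, st0.2)
  (st0.1, st1.1, st1.2)

theorem foldl_pairs (l : List Nat) (C0 C1 : Nat → Int) (acc0 acc1 : List (Int × Int)) :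
    l.foldl (fun u (y : Nat) => (u.1 ++ [((y : Int), C0 y)], u.2 ++ [((y : Int), C1 y)])) (acc0, acc1)
      = (acc0 ++ l.map (fun (y : Nat) => ((y : Int), C0 y)), acc1 ++ l.map (fun (y : Nat) => ((y : Int), C1 y))) := by
  induction l generalizing acc0 acc1 with
  | nil => simp
  | cons x l ih => simp [ih]

theorem foldl_set_row (K a : Nat) (ha : a < K) (w : Nat → Int) :
    ∀ (l : List Nat) (g : Nat → Nat → Int), (∀ y ∈ l, y < K) →
      (l.foldl (fun d (y : Nat) => pvSet2 d (a : Int) (y : Int) (w y)) (pvTbl K g))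
        = pvTbl K (fun x y => if x = a ∧ y ∈ l then w y else g x y) := by
  intro l
  induction l with
  | nil => intro g _; apply tbl_congr; simp
  | cons y0 l ih =>
    intro g hl
    simp only [List.foldl_cons]
    rw [set2_tbl K g a y0 ha (hl y0 (by simp))]
    rw [ih _ (fun y hy => hl y (by simp [hy]))]
    apply tbl_congr
    intro x _ y _
    by_cases hxa : x = a <;> by_cases hyl : y ∈ l <;> by_cases hy0 : y = y0 <;>
      subst_vars <;> simp_all

theorem foldl_set_col (K a : Nat) (ha : a < K) (w : Nat → Int) :
    ∀ (l : List Nat) (g : Nat → Nat → Int), (∀ y ∈ l, y < K) →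
      (l.foldl (fun d (y : Nat) => pvSet2 d (y : Int) (a : Int) (w y)) (pvTbl K g))
        = pvTbl K (fun x y => if y = a ∧ x ∈ l then w x else g x y) := by
  intro l
  induction l with
  | nil => intro g _; apply tbl_congr; simp
  | cons y0 l ih =>
    intro g hl
    simp only [List.foldl_cons]
    rw [set2_tbl K g y0 a (hl y0 (by simp)) ha]
    rw [ih _ (fun y hy => hl y (by simp [hy]))]
    apply tbl_congr
    intro x _ y _
    by_cases hya : y = a <;> by_cases hxl : x ∈ l <;> by_cases hx0 : x = y0 <;>
      subst_vars <;> simp_all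

theorem pvAstep (K : Nat) (f : Nat → Nat → Int) (hf : pvGood f) (aN : Nat) (haN : aN < K)
    (num : Int) (hmod : PySem.Int.mod num (K : Int) = (aN : Int)) (ans : Int) :
    pvAbody (K : Int) (pvTbl K (fun x y => f y x), pvTbl K f, ans) num
      = (pvTbl K (fun x y => pvStep aN f y x), pvTbl K (pvStep aN f),
         fmax (fun y => f aN y + 1) (List.range K)
           (fmax (fun y => f aN y + 1) (List.range K) ans)) := by
  simp only [pvAbody, hmod, pvRange0, List.foldl_map, fmax]
  rw [foldl_pairs]
  have hmap0 : (List.range K).map (fun (y : Nat) =>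
        ((y : Int), max (max (pvGet2 (pvTbl K (fun x y => f y x)) (aN : Int) (y : Int)) 1)
            (pvGet2 (pvTbl K f) (aN : Int) (y : Int) + 1)))
      = (List.range K).map (fun (y : Nat) => ((y : Int), f aN y + 1)) := by
    refine List.map_congr_left (fun y hy => ?_)
    have hyK := List.mem_range.mp hy
    rw [get2_tbl K _ aN y haN hyK, get2_tbl K f aN y haN hyK]
    have h1 := (hf aN y).1
    have h2 := (hf aN y).2
    rw [max_eq_right (max_le h2 (by omega))]
  have hmap1 : (List.range K).map (fun (y : Nat) =>
        ((y : Int), max (max (pvGet2 (pvTbl K f) (y : Int) (aN : Int)) 1)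
            (pvGet2 (pvTbl K (fun x y => f y x)) (y : Int) (aN : Int) + 1)))
      = (List.range K).map (fun (y : Nat) => ((y : Int), f aN y + 1)) := by
    refine List.map_congr_left (fun y hy => ?_)
    have hyK := List.mem_range.mp hy
    rw [get2_tbl K f y aN hyK haN, get2_tbl K _ y aN hyK haN]
    have h1 := (hf aN y).1
    have h2 := (hf aN y).2
    rw [max_eq_right (max_le h2 (by omega))]
  rw [List.nil_append, List.nil_append, hmap0, hmap1]
  rw [PySem.List.foldl_prod_mk (f := fun d (yv : Int × Int) => pvSet2 d (aN : Int) yv.1 yv.2)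
      (g := fun s (yv : Int × Int) => if yv.2 > s then yv.2 else s)]
  rw [PySem.List.foldl_prod_mk (f := fun d (yv : Int × Int) => pvSet2 d yv.1 (aN : Int) yv.2)
      (g := fun s (yv : Int × Int) => if yv.2 > s then yv.2 else s)]
  simp only [List.foldl_map]
  rw [foldl_set_row K aN haN (fun y => f aN y + 1) (List.range K) _ (fun y hy => List.mem_range.mp hy)]
  rw [foldl_set_col K aN haN (fun y => f aN y + 1) (List.range K) _ (fun y hy => List.mem_range.mp hy)]
  refine Prod.ext ?_ (Prod.ext ?_ rfl)
  · apply tbl_congr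
    intro x hx y hy
    simp only [List.mem_range, pvStep]
    by_cases hxa : x = aN <;> simp [hxa, hy]
  · apply tbl_congr
    intro x hx y hy
    simp only [List.mem_range, pvStep]
    by_cases hya : y = aN <;> simp [hya, hx]

def dpN : List Nat → (Nat → Nat → Int) → (Nat → Nat → Int)
  | [], f => f
  | a :: t, f => dpN t (pvStep a f)

def ansN (K : Nat) : List Nat → (Nat → Nat → Int) → Int → Int
  | [], _, s => s
  | a :: t, f, s => ansN K t (pvStep a f) (fmax (fun y => f a y + 1) (List.range K) s)

theorem pvMainA (K : Nat) (hK : 0 < K) :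
    ∀ (nums : List Int) (f : Nat → Nat → Int) (ans : Int), pvGood f →
    (nums.foldl (pvAbody (K : Int)) (pvTbl K (fun x y => f y x), pvTbl K f, ans)).2.2
      = ansN K (nums.map (fun n => (PySem.Int.mod n (K : Int)).toNat)) f ans := by
  intro nums
  induction nums with
  | nil => intro f ans _; rfl
  | cons num nums ih =>
    intro f ans hf
    have hk0 : (0 : Int) < (K : Int) := by exact_mod_cast hK
    have hmod : PySem.Int.mod num (K : Int) = (((PySem.Int.mod num (K : Int)).toNat : Nat) : Int) := by
      have := PySem.Int.mod_nonneg num hk0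
      omega
    have haN : (PySem.Int.mod num (K : Int)).toNat < K := by
      have h1 := PySem.Int.mod_nonneg num hk0
      have h2 := PySem.Int.mod_lt num hk0
      omega
    simp only [List.map_cons, List.foldl_cons, ansN]
    rw [pvAstep K f hf _ haN num hmod ans]
    rw [ih (pvStep (PySem.Int.mod num (K : Int)).toNat f) _
        (good_step (PySem.Int.mod num (K : Int)).toNat f hf)]
    rw [fmax_twice]

-- ==== stage 4: closed form of ansN as a max over the final table ====

def pairsOf {α : Type} (l : List α) : List (α × α) :=
  l.flatMap (fun x => l.map (fun y => (x, y)))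

theorem mem_pairsOf {α : Type} (l : List α) (a b : α) :
    (a, b) ∈ pairsOf l ↔ a ∈ l ∧ b ∈ l := by
  simp [pairsOf, List.mem_flatMap, List.mem_map]

def pvPairs (K : Nat) : List (Nat × Nat) := pairsOf (List.range K)

theorem mem_pvPairs (K : Nat) (p c : Nat) : (p, c) ∈ pvPairs K ↔ p < K ∧ c < K := by
  simp [pvPairs, pairsOf, List.mem_flatMap, List.mem_map, List.mem_range]

theorem step_mono (a : Nat) (f : Nat → Nat → Int) (hf : pvGood f) (p c : Nat) :
    f p c ≤ pvStep a f p c := by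
  simp only [pvStep]
  by_cases h : c = a
  · rw [if_pos h, h]
    exact (hf a p).2
  · simp [h]

theorem dpN_mono : ∀ (L : List Nat) (f : Nat → Nat → Int), pvGood f → ∀ p c,
    f p c ≤ dpN L f p c := by
  intro L
  induction L with
  | nil => intro f _ p c; simp [dpN]
  | cons a t ih =>
    intro f hf p c
    exact le_trans (step_mono a f hf p c) (ih (pvStep a f) (good_step a f hf) p c)

theorem ansC (K : Nat) : ∀ (L : List Nat) (f : Nat → Nat → Int) (s : Int),
    (∀ a ∈ L, a < K) → pvGood f → (∀ p < K, ∀ c < K, f p c ≤ s) →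
    ansN K L f s = fmax (fun pc : Nat × Nat => dpN L f pc.1 pc.2) (pvPairs K) s := by
  intro L
  induction L with
  | nil =>
    intro f s _ _ hle
    simp only [ansN, dpN]
    exact (fmax_const _ _ _ (fun pc hpc => by
      rcases pc with ⟨p, c⟩
      have := (mem_pvPairs K p c).mp hpc
      exact hle p this.1 c this.2)).symm
  | cons a t ih =>
    intro f s hL hf hle
    have haK : a < K := hL a (by simp)
    set g := pvStep a f with hg
    set s' := fmax (fun y => f a y + 1) (List.range K) s with hs'
    have hcol : ∀ y, f a y + 1 = g y a := by intro y; simp [hg, pvStep]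
    have hgood : pvGood g := good_step a f hf
    have hgle : ∀ p < K, ∀ c < K, g p c ≤ s' := by
      intro p hp c hc
      by_cases h : c = a
      · subst h
        rw [← hcol p]
        exact fmax_mem _ (List.range K) s p (List.mem_range.mpr hp)
      · have : g p c = f p c := by simp [hg, pvStep, h]
        rw [this]
        exact le_trans (hle p hp c hc) (fmax_le _ _ _)
    have hstep : ansN K (a :: t) f s = ansN K t g s' := by
      simp only [ansN, ← hg, ← hs']
    rw [hstep, ih g s' (fun b hb => hL b (by simp [hb])) hgood hgle]
    have hCC : (fun pc : Nat × Nat => dpN (a :: t) f pc.1 pc.2)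
        = (fun pc : Nat × Nat => dpN t g pc.1 pc.2) := by
      funext pc; simp only [dpN, ← hg]
    rw [hCC]
    -- both sides are fmax over the same entries, started from s' resp. s
    have hRle : fmax (fun pc : Nat × Nat => dpN t g pc.1 pc.2) (pvPairs K) s
        ≤ fmax (fun pc : Nat × Nat => dpN t g pc.1 pc.2) (pvPairs K) s' := by
      refine fmax_ub _ _ _ _ (le_trans (fmax_le _ _ _) (fmax_le _ _ _)) ?_
      intro e he
      exact fmax_mem _ _ _ e he
    have hLle : fmax (fun pc : Nat × Nat => dpN t g pc.1 pc.2) (pvPairs K) s'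
        ≤ fmax (fun pc : Nat × Nat => dpN t g pc.1 pc.2) (pvPairs K) s := by
      refine fmax_ub _ _ _ _ ?_ (fun e he => fmax_mem _ _ _ e he)
      -- s' ≤ RHS: each f a y + 1 = g y a ≤ dpN t g y a ≤ RHS, and s ≤ RHS
      refine fmax_ub _ _ _ _ (fmax_le _ _ _) ?_
      intro y hy
      rw [hcol y]
      refine le_trans (dpN_mono t g hgood y a) ?_
      exact fmax_mem _ _ _ (y, a)
        ((mem_pvPairs K y a).mpr ⟨List.mem_range.mp hy, haK⟩)
    exact le_antisymm hLle hRle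

-- ==== stage 5: the final DP table is the greedy pattern count on the reversed list ====

def gsp : List Int → Int → Int → Int
  | [], _, _ => 0
  | r :: t, x, y => if r = x then gsp t y x + 1 else gsp t x y

theorem foldr_gsp : ∀ (R : List Nat) (p c : Nat),
    (R.foldr pvStep (fun _ _ => (0 : Int))) p c
      = gsp (R.map Int.ofNat) (c : Int) (p : Int) := by
  intro R
  induction R with
  | nil => intro p c; simp [gsp]
  | cons a t ih =>
    intro p c
    have hstep : (List.foldr pvStep (fun _ _ => (0 : Int)) (a :: t)) p c
        = if c = a then (List.foldr pvStep (fun _ _ => (0 : Int)) t) a p + 1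
          else (List.foldr pvStep (fun _ _ => (0 : Int)) t) p c := rfl
    rw [hstep, List.map_cons]
    by_cases h : c = a
    · rw [if_pos h]
      simp only [gsp]
      rw [if_pos (show Int.ofNat a = ((c : Nat) : Int) by
        rw [Int.ofNat_eq_natCast]; exact_mod_cast h.symm)]
      rw [ih a p, h]
    · rw [if_neg h]
      simp only [gsp]
      rw [if_neg (show ¬ Int.ofNat a = ((c : Nat) : Int) from
        fun hh => h (by
          rw [Int.ofNat_eq_natCast] at hh
          exact_mod_cast hh.symm))]
      exact ih p c

theorem dpN_foldr : ∀ (L : List Nat) (f : Nat → Nat → Int),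
    dpN L f = L.reverse.foldr pvStep f := by
  intro L
  induction L with
  | nil => intro f; simp [dpN]
  | cons a t ih =>
    intro f
    simp only [dpN, List.reverse_cons, List.foldr_append, List.foldr_cons, List.foldr_nil]
    exact ih (pvStep a f)

-- ==== stage 5b: position buckets and the two-pointer greedy ====

def posF : List Int → Int → Int → List Int
  | [], _, _ => []
  | r :: t, s, x => if r = x then s :: posF t (s + 1) x else posF t (s + 1) x

def altT : List Int → List Int → Int → Int
  | [], _, _ => 0
  | p :: px, py, cur => if p > cur then 1 + altT py px p else altT px py cur
termination_by px py _ => px.length + py.length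
decreasing_by all_goals (simp only [List.length_cons]; omega)

theorem posF_lb : ∀ (res : List Int) (s x : Int), ∀ q ∈ posF res s x, s ≤ q := by
  intro res
  induction res with
  | nil => intro s x q hq; simp [posF] at hq
  | cons r t ih =>
    intro s x q hq
    by_cases h : r = x
    · rw [posF, if_pos h] at hq
      rcases List.mem_cons.mp hq with h1 | h1
      · omega
      · have := ih (s + 1) x q h1; omega
    · rw [posF, if_neg h] at hq
      have := ih (s + 1) x q hq; omega

theorem posF_len : ∀ (res : List Int) (s x : Int), (posF res s x).length = res.count x := by
  intro res
  induction res with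
  | nil => intro s x; simp [posF]
  | cons r t ih =>
    intro s x
    by_cases h : r = x
    · simp [posF, h, ih]
    · simp [posF, h, ih]

theorem gsp_self : ∀ (res : List Int) (x : Int), gsp res x x = (res.count x : Int) := by
  intro res
  induction res with
  | nil => intro x; simp [gsp]
  | cons r t ih =>
    intro x
    by_cases h : r = x
    · simp [gsp, h, ih]
    · simp [gsp, h, ih]

theorem gsp_not_left : ∀ (res : List Int) (x y : Int), x ∉ res → gsp res x y = 0 := by
  intro res
  induction res with
  | nil => intro x y _; rfl
  | cons r t ih =>
    intro x y hx
    have hrx : ¬ r = x := fun h => hx (by simp [h])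
    rw [gsp, if_neg hrx]
    exact ih x y (fun h => hx (by simp [h]))

theorem gsp_not_right : ∀ (res : List Int) (x y : Int), y ∉ res → gsp res x y ≤ 1 := by
  intro res
  induction res with
  | nil => intro x y _; simp [gsp]
  | cons r t ih =>
    intro x y hy
    by_cases hrx : r = x
    · rw [gsp, if_pos hrx]
      have : gsp t y x = 0 := gsp_not_left t y x (fun h => hy (by simp [h]))
      omega
    · rw [gsp, if_neg hrx]
      exact ih x y (fun h => hy (by simp [h]))

-- a stale head on the other bucket is skipped by the greedy walk
theorem altT_stale (e : Int) : ∀ (px py : List Int) (cur : Int), (∀ q ∈ px, e < q) →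
    altT px (e :: py) cur = altT px py cur := by
  intro px
  induction px with
  | nil => intro py cur _; simp [altT]
  | cons p px' ih =>
    intro py cur h
    have hep : e < p := h p (by simp)
    by_cases hc : p > cur
    · rw [altT, if_pos hc, altT, if_neg (by omega), altT, if_pos hc]
    · rw [altT, if_neg hc, altT, if_neg hc]
      exact ih py cur (fun q hq => h q (by simp [hq]))

theorem altT_gsp : ∀ (res : List Int) (x y s cur : Int), x ≠ y → cur < s →
    altT (posF res s x) (posF res s y) cur = gsp res x y := by
  intro res
  induction res with
  | nil => intro x y s cur _ _; simp [posF, altT, gsp]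
  | cons r t ih =>
    intro x y s cur hxy hcur
    by_cases hrx : r = x
    · have hry : ¬ r = y := fun h => hxy (hrx ▸ h ▸ rfl)
      rw [posF, if_pos hrx, posF, if_neg hry, altT, if_pos hcur, gsp, if_pos hrx]
      rw [ih y x (s + 1) s (Ne.symm hxy) (by omega)]
      omega
    · by_cases hry : r = y
      · rw [posF, if_neg hrx, posF, if_pos hry, gsp, if_neg hrx]
        rw [altT_stale s (posF t (s + 1) x) (posF t (s + 1) y) cur
          (fun q hq => by have := posF_lb t (s + 1) x q hq; omega)]
        exact ih x y (s + 1) cur hxy (by omega)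
      · rw [posF, if_neg hrx, posF, if_neg hry, gsp, if_neg hrx]
        exact ih x y (s + 1) cur hxy (by omega)

theorem pyAltGo_eq (bx by_ : List Int) : ∀ (n i j : Nat) (cur cnt : Int) (w : Bool),
    (bx.length - i) + (by_.length - j) ≤ n →
    pyAltGo bx by_ i j cur cnt w
      = cnt + (if w then altT (bx.drop i) (by_.drop j) cur
               else altT (by_.drop j) (bx.drop i) cur) := by
  intro n
  induction n with
  | zero =>
    intro i j cur cnt w hn
    have hi : bx.length ≤ i := by omega
    have hj : by_.length ≤ j := by omega
    rw [pyAltGo, List.drop_eq_nil_of_le hi, List.drop_eq_nil_of_le hj]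
    cases w <;> simp [hi, hj, altT]
  | succ n ih =>
    intro i j cur cnt w hn
    rw [pyAltGo]
    cases w with
    | true =>
      rw [if_pos rfl]
      by_cases h : i < bx.length
      · rw [dif_pos h]
        have hget : PySem.List.pyGetD bx (i : Int) 0 = bx[i] := by
          rw [PySem.List.pyGetD_natCast]
          exact List.getD_eq_getElem bx 0 h
        have hdrop : bx.drop i = bx[i] :: bx.drop (i + 1) := List.drop_eq_getElem_cons h
        simp only [hget]
        by_cases hp : bx[i] > cur
        · rw [if_pos hp, ih (i + 1) j bx[i] (cnt + 1) false (by omega)]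
          rw [hdrop, altT, if_pos hp]
          simp
          omega
        · rw [if_neg hp, ih (i + 1) j cur cnt true (by omega)]
          rw [hdrop, altT, if_neg hp]
          simp
      · rw [dif_neg h]
        have hb : bx.length ≤ i := by omega
        rw [List.drop_eq_nil_of_le hb, altT]
        simp
    | false =>
      rw [if_neg Bool.false_ne_true]
      by_cases h : j < by_.length
      · rw [dif_pos h]
        have hget : PySem.List.pyGetD by_ (j : Int) 0 = by_[j] := by
          rw [PySem.List.pyGetD_natCast]
          exact List.getD_eq_getElem by_ 0 h
        have hdrop : by_.drop j = by_[j] :: by_.drop (j + 1) := List.drop_eq_getElem_cons h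
        simp only [hget]
        by_cases hp : by_[j] > cur
        · rw [if_pos hp, ih i (j + 1) by_[j] (cnt + 1) true (by omega)]
          rw [hdrop, altT, if_pos hp]
          simp
          omega
        · rw [if_neg hp, ih i (j + 1) cur cnt false (by omega)]
          rw [hdrop, altT, if_neg hp]
          simp
      · rw [dif_neg h]
        have hb : by_.length ≤ j := by omega
        rw [List.drop_eq_nil_of_le hb, altT]
        simp

-- ==== stage 6: bridging both ports ====

theorem bridgeA (nums : List Int) (k : Int) :
    maximumLength nums k
      = (nums.foldl (pvAbody k)
          ((PySem.List.pyRange 0 k 1).map (fun _ => List.replicate k.toNat 0),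
           (PySem.List.pyRange 0 k 1).map (fun _ => List.replicate k.toNat 0), 1)).2.2 := rfl

theorem init_eq_tbl (K : Nat) :
    (PySem.List.pyRange 0 (K : Int) 1).map (fun _ => List.replicate ((K : Int)).toNat 0)
      = pvTbl K (fun _ _ => 0) := by
  rw [pvRange0, List.map_map]
  unfold pvTbl
  refine List.map_congr_left (fun x _ => ?_)
  simp

theorem good_zero : pvGood (fun _ _ => 0) := by
  intro x y; constructor <;> simp

theorem foldl_flatMap_fold {α β : Type} (g : α → List β) (f : Int → β → Int) :
    ∀ (l : List α) (s : Int), (l.flatMap g).foldl f s = l.foldl (fun s a => (g a).foldl f s) s := by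
  intro l
  induction l with
  | nil => intro s; simp
  | cons x l ih => intro s; simp [List.foldl_append, ih]

theorem foldl_fun_congr {α : Type} (l : List α) (f g : Int → α → Int)
    (h : ∀ s a, f s a = g s a) : ∀ s : Int, l.foldl f s = l.foldl g s := by
  induction l with
  | nil => intro s; rfl
  | cons x l ih => intro s; simp only [List.foldl_cons, h]; exact ih _

theorem fmax_nested {α : Type} (l : List α) (C : α → α → Int) (s : Int) :
    l.foldl (fun s x => l.foldl (fun s y => if C x y > s then C x y else s) s) s
      = fmax (fun pc : α × α => C pc.1 pc.2) (pairsOf l) s := by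
  unfold fmax pairsOf
  rw [foldl_flatMap_fold]
  exact foldl_fun_congr _ _ _ (fun s' x => by rw [List.foldl_map]) s

theorem fmax_swap (K : Nat) (C : Nat × Nat → Int) (s : Int) :
    fmax C (pvPairs K) s = fmax (fun pc : Nat × Nat => C (pc.2, pc.1)) (pvPairs K) s := by
  apply le_antisymm
  · refine fmax_ub _ _ _ _ (fmax_le _ _ _) ?_
    rintro ⟨p, c⟩ he
    have h := (mem_pvPairs K p c).mp he
    exact fmax_mem (fun pc : Nat × Nat => C (pc.2, pc.1)) (pvPairs K) s (c, p)
      ((mem_pvPairs K c p).mpr ⟨h.2, h.1⟩)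
  · refine fmax_ub _ _ _ _ (fmax_le _ _ _) ?_
    rintro ⟨p, c⟩ he
    have h := (mem_pvPairs K p c).mp he
    exact fmax_mem C (pvPairs K) s (c, p) ((mem_pvPairs K c p).mpr ⟨h.2, h.1⟩)

-- buckets[x] holds exactly the positions of residue x (as posF of the residue list)
theorem bucket_posF (nums : List Int) (k x : Int) :
    ∀ (zs : List Int) (s : Int),
      (((PySem.List.enumerate zs s).filter (fun q => PySem.Int.mod q.2 k == x)).map (fun q => q.1))
        = posF (zs.map (fun m => PySem.Int.mod m k)) s x := by
  intro zs
  induction zs with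
  | nil => intro s; simp [posF, PySem.List.enumerate_nil]
  | cons z t ih =>
    intro s
    rw [PySem.List.enumerate_cons, List.map_cons, posF]
    by_cases h : PySem.Int.mod z k = x
    · rw [if_pos h, List.filter_cons_of_pos (by simpa using h), List.map_cons, ih]
    · rw [if_neg h, List.filter_cons_of_neg (by simpa using h), ih]

theorem bridgeB (nums : List Int) (k : Int) :
    maximumLength_alt nums k
      = fmax (fun pc : Int × Int =>
          gsp (nums.reverse.map (fun m => PySem.Int.mod m k)) pc.1 pc.2)
          (pairsOf (PySem.Set.ofList (nums.reverse.map (fun m => PySem.Int.mod m k)))) 1 := by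
  set res : List Int := nums.reverse.map (fun m => PySem.Int.mod m k) with hres
  have hfold : (PySem.List.enumerate nums.reverse 0).foldl
        (fun (d : PySem.Dict Int (List Int)) q =>
          d.modify (PySem.Int.mod q.2 k) [] (· ++ [q.1])) PySem.Dict.empty
      = ((PySem.List.enumerate nums.reverse 0).map
          (fun q : Int × Int => (PySem.Int.mod q.2 k, q.1))).foldl
          (fun (d : PySem.Dict Int (List Int)) p => d.modify p.1 [] (· ++ [p.2]))
          PySem.Dict.empty := by
    rw [List.foldl_map]
  have hbucket : ∀ x : Int, PySem.Dict.getD ((PySem.List.enumerate nums.reverse 0).foldl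
        (fun (d : PySem.Dict Int (List Int)) q =>
          d.modify (PySem.Int.mod q.2 k) [] (· ++ [q.1])) PySem.Dict.empty) x []
      = posF res 0 x := by
    intro x
    rw [hfold, PySem.Dict.getD_foldl_modify_append, PySem.Dict.getD_empty, List.nil_append]
    rw [List.filter_map, List.map_map]
    have h1 : ((fun p : Int × Int => p.1 == x) ∘
        (fun q : Int × Int => (PySem.Int.mod q.2 k, q.1)))
        = (fun q : Int × Int => PySem.Int.mod q.2 k == x) := rfl
    have h2 : ((fun p : Int × Int => p.2) ∘
        (fun q : Int × Int => (PySem.Int.mod q.2 k, q.1)))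
        = (fun q : Int × Int => q.1) := rfl
    rw [h1, h2, bucket_posF nums k x nums.reverse 0]
  have hkeys : PySem.Dict.keys ((PySem.List.enumerate nums.reverse 0).foldl
        (fun (d : PySem.Dict Int (List Int)) q =>
          d.modify (PySem.Int.mod q.2 k) [] (· ++ [q.1])) PySem.Dict.empty)
      = PySem.Set.ofList res := by
    rw [PySem.Dict.keys_foldl_modify_key (key := fun q : Int × Int => PySem.Int.mod q.2 k)]
    rw [PySem.Dict.keys_empty, PySem.Set.update_nil_left]
    congr 1
    rw [show (fun q : Int × Int => PySem.Int.mod q.2 k)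
        = (fun m : Int => PySem.Int.mod m k) ∘ (fun q : Int × Int => q.2) from rfl]
    rw [← List.map_map, PySem.List.map_snd_enumerate]
  have hC : ∀ x y : Int,
      (if x == y then ((posF res 0 x).length : Int)
       else pyAltGo (posF res 0 x) (posF res 0 y) 0 0 (-1) 0 true) = gsp res x y := by
    intro x y
    by_cases hxy : x = y
    · rw [if_pos (beq_iff_eq.mpr hxy), hxy, gsp_self]
      exact_mod_cast posF_len res 0 y
    · rw [if_neg (by simpa using hxy)]
      rw [pyAltGo_eq (posF res 0 x) (posF res 0 y)
          ((posF res 0 x).length + (posF res 0 y).length) 0 0 (-1) 0 true (by omega)]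
      rw [if_pos rfl, List.drop_zero, List.drop_zero, zero_add]
      exact altT_gsp res x y 0 (-1) hxy (by omega)
  simp only [maximumLength_alt, hkeys, hbucket, hC]
  exact fmax_nested (PySem.Set.ofList res) (fun x y => gsp res x y) 1

theorem lowA (k : Int) (hk : k ≤ 0) :
    ∀ (nums : List Int) (st : List (List Int) × List (List Int) × Int),
      nums.foldl (pvAbody k) st = st := by
  intro nums
  induction nums with
  | nil => intro st; rfl
  | cons num nums ih =>
    intro st
    rw [List.foldl_cons]
    have hbody : pvAbody k st num = st := by
      simp [pvAbody, PySem.List.pyRange_one_eq_nil hk]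
    rw [hbody, ih]

theorem gsp_nonneg : ∀ (res : List Int) (x y : Int), 0 ≤ gsp res x y := by
  intro res
  induction res with
  | nil => intro x y; simp [gsp]
  | cons r t ih =>
    intro x y
    by_cases h : r = x
    · rw [gsp, if_pos h]; have := ih y x; omega
    · rw [gsp, if_neg h]; exact ih x y

theorem altB_single (n k : Int) : maximumLength_alt [n] k = 1 := by
  rw [bridgeB [n] k]
  simp [fmax, pairsOf, PySem.Set.ofList, PySem.Set.add, gsp]

theorem maximumLength_eq_alt (nums : List Int) (k : Int) (hpre : Pre_maximumLength nums k)
    (hnd : ¬ D_maximumLength nums k) :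
    maximumLength nums k = maximumLength_alt nums k := by
  rcases lt_trichotomy k 0 with hneg | hzero | hpos
  · -- k < 0: outside D_ means at most one element
    have hlen : nums.length ≤ 1 := by
      unfold D_maximumLength at hnd
      push_neg at hnd
      have := hnd hneg
      omega
    have hA1 : maximumLength nums k = 1 := by
      rw [bridgeA, lowA k (by omega)]
    match nums, hlen with
    | [], _ => rw [hA1]; rfl
    | [n], _ => rw [hA1, altB_single n k]
  · -- k = 0: Pre_ forces nums = []
    subst hzero
    rcases hpre with hnil | hne
    · subst hnil; rfl
    · exact absurd rfl hne
  · -- 0 < k: the main case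
    have hkk : ((k.toNat : Nat) : Int) = k := Int.toNat_of_nonneg (by omega)
    rw [← hkk]
    set K := k.toNat with hKdef
    have hK : 0 < K := by omega
    have hk0 : (0 : Int) < (K : Int) := by exact_mod_cast hK
    set L : List Nat := nums.map (fun n => (PySem.Int.mod n (K : Int)).toNat) with hL
    set res : List Int := nums.reverse.map (fun m => PySem.Int.mod m (K : Int)) with hres
    have hresL : L.reverse.map Int.ofNat = res := by
      rw [hL, hres, ← List.map_reverse, List.map_map]
      refine List.map_congr_left (fun n _ => ?_)
      simp only [Function.comp_apply, Int.ofNat_eq_natCast]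
      exact Int.toNat_of_nonneg (PySem.Int.mod_nonneg n hk0)
    have hdp : ∀ pc : Nat × Nat, dpN L (fun _ _ => 0) pc.1 pc.2
        = gsp res ((pc.2 : Nat) : Int) ((pc.1 : Nat) : Int) := by
      intro pc
      rw [dpN_foldr, foldr_gsp, hresL]
    have hA : maximumLength nums (K : Int)
        = fmax (fun pc : Nat × Nat => gsp res ((pc.1 : Nat) : Int) ((pc.2 : Nat) : Int))
            (pvPairs K) 1 := by
      rw [bridgeA, init_eq_tbl K]
      have hmain : (nums.foldl (pvAbody (K : Int))
            (pvTbl K (fun x y => (fun _ _ => (0 : Int)) y x), pvTbl K (fun _ _ => (0 : Int)), 1)).2.2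
          = ansN K L (fun _ _ => 0) 1 := pvMainA K hK nums (fun _ _ => 0) 1 good_zero
      rw [show pvTbl K (fun _ _ => (0 : Int)) = pvTbl K (fun x y => (fun _ _ => (0 : Int)) y x) from rfl]
      rw [hmain]
      have hC := ansC K L (fun _ _ => 0) 1 ?_ good_zero (fun p _ c _ => by simp)
      · rw [hC, fmax_swap]
        refine congrArg (fun C => fmax C (pvPairs K) 1) (funext fun pc => ?_)
        exact hdp (pc.2, pc.1)
      · intro a ha
        rw [hL] at ha
        obtain ⟨n, _, hn⟩ := List.mem_map.mp ha
        have h1 := PySem.Int.mod_nonneg n hk0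
        have h2 := PySem.Int.mod_lt n hk0
        omega
    rw [hA, bridgeB nums (K : Int)]
    have hrb : ∀ r ∈ res, 0 ≤ r ∧ r < (K : Int) := by
      intro r hr
      rw [hres] at hr
      obtain ⟨n, _, hn⟩ := List.mem_map.mp hr
      exact hn ▸ ⟨PySem.Int.mod_nonneg n hk0, PySem.Int.mod_lt n hk0⟩
    apply le_antisymm
    · refine fmax_ub _ _ _ _ (fmax_le _ _ _) ?_
      rintro ⟨p, c⟩ he
      by_cases hp : ((p : Int) ∈ res)
      · by_cases hc : ((c : Int) ∈ res)
        · exact fmax_mem _ _ _ ((p : Int), (c : Int))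
            ((mem_pairsOf _ _ _).mpr
              ⟨(PySem.Set.mem_ofList _ _).mpr hp, (PySem.Set.mem_ofList _ _).mpr hc⟩)
        · exact le_trans (gsp_not_right res _ _ hc) (fmax_le _ _ _)
      · rw [gsp_not_left res _ _ hp]
        exact le_trans (by omega) (fmax_le _ _ _)
    · refine fmax_ub _ _ _ _ (fmax_le _ _ _) ?_
      rintro ⟨x, y⟩ he
      have hxy := (mem_pairsOf _ x y).mp he
      have hxr : x ∈ res := (PySem.Set.mem_ofList _ _).mp hxy.1
      have hyr : y ∈ res := (PySem.Set.mem_ofList _ _).mp hxy.2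
      obtain ⟨hx0, hxK⟩ := hrb x hxr
      obtain ⟨hy0, hyK⟩ := hrb y hyr
      have hx : ((x.toNat : Nat) : Int) = x := by omega
      have hy : ((y.toNat : Nat) : Int) = y := by omega
      have hmem : (x.toNat, y.toNat) ∈ pvPairs K := (mem_pvPairs K _ _).mpr ⟨by omega, by omega⟩
      have hv := fmax_mem (fun pc : Nat × Nat => gsp res ((pc.1 : Nat) : Int) ((pc.2 : Nat) : Int))
          (pvPairs K) 1 (x.toNat, y.toNat) hmem
      have hv2 : gsp res ((x.toNat : Nat) : Int) ((y.toNat : Nat) : Int)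
          ≤ fmax (fun pc : Nat × Nat => gsp res ((pc.1 : Nat) : Int) ((pc.2 : Nat) : Int))
              (pvPairs K) 1 := hv
      rw [hx, hy] at hv2
      exact hv2

-- ===== VERDICT =====
theorem maximumLength_spec : Claim_unchanged_maximumLength := by
  intro nums k _ hpre
  unfold Spec_maximumLength
  intro hnd
  exact maximumLength_eq_alt nums k hpre hnd

theorem maximumLength_changed : Claim_changed_maximumLength := by
  unfold Claim_changed_maximumLength; decide

theorem maximumLength_tight : Claim_exact_maximumLength := by
  intro nums k _ _ hd
  obtain ⟨hneg, hlen⟩ := hd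
  have hA1 : maximumLength nums k = 1 := by
    rw [bridgeA, lowA k (by omega)]
  rw [hA1, bridgeB nums k]
  set res : List Int := nums.reverse.map (fun m => PySem.Int.mod m k) with hres
  have hlr : 2 ≤ res.length := by
    rw [hres, List.length_map, List.length_reverse]; exact hlen
  match hr : res, hlr with
  | r0 :: r1 :: rest, _ =>
    have hmem : (r0, r1) ∈ pairsOf (PySem.Set.ofList (r0 :: r1 :: rest)) := by
      refine (mem_pairsOf _ _ _).mpr ⟨?_, ?_⟩ <;>
        · rw [PySem.Set.mem_ofList]; simp
    have hval : 2 ≤ gsp (r0 :: r1 :: rest) r0 r1 := by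
      rw [gsp, if_pos rfl, gsp, if_pos rfl]
      have := gsp_nonneg rest r0 r1
      omega
    have hge := fmax_mem (fun pc : Int × Int => gsp (r0 :: r1 :: rest) pc.1 pc.2)
        (pairsOf (PySem.Set.ofList (r0 :: r1 :: rest))) 1 (r0, r1) hmem
    intro h
    simp only at hge
    omega
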